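-- pv_equiv track=rewrite | github.com/Kittikanj/SWD_Test | logical_test.py/number_to_thaitext.py | number_to_thaitext
-- ===== SOURCE A (Python) =====
-- def number_to_thaitext(number):
--
--     if number < 0 or number >= 10000000:
--         return "Invalid number"
--
--     thai = {0:"ศูนย์",
--             1:"หนึ่ง",
--             2:"สอง",
--             3:"สาม",
--             4:"สี่",
--             5:"ห้า",
--             6:"หก",
--             7:"เจ็ด",
--             8:"แปด",
--             9:"เก้า"}
--
--     unit = ["", "สิบ", "ร้อย", "พัน", "หมื่น", "แสน", "ล้าน"]
--
--     if number == 0: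
--         return thai[0]
--
--     thai_text = ""
--     i = 0
--     while number > 0:
--         digit = number % 10
--         if i == 1 and digit == 2:
--             thai_text = "ยี่สิบ" + thai_text
--         elif i == 1 and digit == 1:
--             thai_text = "สิบ" + thai_text
--         elif i > 1 and digit == 1 and number // 10 % 10 != 0:
--             thai_text = "เอ็ด" + unit[i] + thai_text
--         elif digit != 0:
--             thai_text = thai[digit] + unit[i] + thai_text
--         number //= 10
--         i += 1
--
--     return thai_text
-- ===== SOURCE B (Python) =====
-- def number_to_thaitext(number):
--     if number < 0 or number >= 10000000:
--         return "Invalid number"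
--     if number == 0:
--         return "\u0e28\u0e39\u0e19\u0e22\u0e4c"
--
--     thai = ["ศูนย์", "หนึ่ง", "สอง", "สาม", "สี่", "ห้า", "หก", "เจ็ด", "แปด", "เก้า"]
--     unit = ["", "สิบ", "ร้อย", "พัน", "หมื่น", "แสน", "ล้าน"]
--
--     s = str(number)
--     n = len(s)
--     out = []
--     for j, ch in enumerate(s):
--         d = ord(ch) - 48
--         i = n - 1 - j
--         if i == 1 and d == 2:
--             out.append("ยี่สิบ")
--         elif i == 1 and d == 1:
--             out.append("สิบ")
--         elif i > 1 and d == 1 and j > 0 and s[j - 1] != '0':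
--             out.append("เอ็ด" + unit[i])
--         elif d != 0:
--             out.append(thai[d] + unit[i])
--     return "".join(out)
-- ===== Notes on version B (the rewrite author's own statement) =====
-- stated objective: alternative
-- what changed: B replaces A's arithmetic least-significant-first while-loop (repeated %10 and //10, prepending each fragment) by a single left-to-right pass over str(number), deriving each digit's exponent from its string position and the เอ็ด-lookback from the previous character, appending fragments and joining once.
import Mathlib
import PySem

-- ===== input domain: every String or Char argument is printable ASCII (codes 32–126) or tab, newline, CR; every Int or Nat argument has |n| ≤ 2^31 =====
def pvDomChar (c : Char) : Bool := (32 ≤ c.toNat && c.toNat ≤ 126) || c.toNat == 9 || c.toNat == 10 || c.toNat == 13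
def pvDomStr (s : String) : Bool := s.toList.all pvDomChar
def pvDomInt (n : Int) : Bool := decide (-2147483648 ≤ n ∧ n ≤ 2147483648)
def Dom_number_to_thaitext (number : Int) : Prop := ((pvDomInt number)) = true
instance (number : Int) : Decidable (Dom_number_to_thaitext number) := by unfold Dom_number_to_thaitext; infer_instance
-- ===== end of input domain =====

-- B converts the number to its decimal string once and walks it left-to-right (A loops arithmetically
-- over %10 / //10 right-to-left, prepending); same return value, objective: alternative decomposition.

-- ===== PORT A =====
-- A's dict 'thai' (Python dict[int, str]; values kept as List Char so the kernel can compute with them)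
def thaiA : PySem.Dict Int (List Char) :=
  PySem.Dict.mk [(0, "ศูนย์".toList), (1, "หนึ่ง".toList), (2, "สอง".toList), (3, "สาม".toList),
    (4, "สี่".toList), (5, "ห้า".toList), (6, "หก".toList), (7, "เจ็ด".toList), (8, "แปด".toList),
    (9, "เก้า".toList)]

-- A's list 'unit'
def unitA : List (List Char) :=
  [[], "สิบ".toList, "ร้อย".toList, "พัน".toList, "หมื่น".toList, "แสน".toList, "ล้าน".toList]

-- A's while-loop: state (number, i, thai_text); thai[digit] and unit[i] are always hit in range,
-- so the total getD forms are exact here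
def loopA (number : Int) (i : Int) (text : List Char) : List Char :=
  if _h : 0 < number then
    let digit := PySem.Int.mod number 10
    let text' :=
      if i = 1 ∧ digit = 2 then "ยี่สิบ".toList ++ text
      else if i = 1 ∧ digit = 1 then "สิบ".toList ++ text
      else if 1 < i ∧ digit = 1 ∧ PySem.Int.mod (PySem.Int.floordiv number 10) 10 ≠ 0 then
        "เอ็ด".toList ++ PySem.List.pyGetD unitA i [] ++ text
      else if digit ≠ 0 then
        PySem.Dict.getD thaiA digit [] ++ PySem.List.pyGetD unitA i [] ++ text
      else text
    loopA (PySem.Int.floordiv number 10) (i + 1) text'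
  else text
termination_by number.toNat
decreasing_by
  rw [PySem.Int.floordiv_eq_ediv_of_pos (by norm_num)]
  omega

def number_to_thaitext (number : Int) : String :=
  if number < 0 ∨ 10000000 ≤ number then "Invalid number"
  else if number = 0 then String.ofList (PySem.Dict.getD thaiA 0 [])
  else String.ofList (loopA number 0 [])

-- ===== PORT B =====
-- B's lists 'thai' and 'unit'
def thaiB : List (List Char) :=
  ["ศูนย์".toList, "หนึ่ง".toList, "สอง".toList, "สาม".toList, "สี่".toList, "ห้า".toList,
   "หก".toList, "เจ็ด".toList, "แปด".toList, "เก้า".toList]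

def unitB : List (List Char) :=
  [[], "สิบ".toList, "ร้อย".toList, "พัน".toList, "หมื่น".toList, "แสน".toList, "ล้าน".toList]

-- the body of B's 'for j, ch in enumerate(s)' loop (s[j-1] is only read under the guard 0 < j,
-- so the total pyGetD form with an arbitrary default is exact)
def stepB (s : List Char) (acc : List (List Char)) (jc : Int × Char) : List (List Char) :=
  let j := jc.1
  let d : Int := (jc.2.toNat : Int) - 48
  let i : Int := (s.length : Int) - 1 - j
  if i = 1 ∧ d = 2 then acc ++ ["ยี่สิบ".toList]
  else if i = 1 ∧ d = 1 then acc ++ ["สิบ".toList]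
  else if 1 < i ∧ d = 1 ∧ 0 < j ∧ PySem.List.pyGetD s (j - 1) ' ' ≠ '0' then
    acc ++ ["เอ็ด".toList ++ PySem.List.pyGetD unitB i []]
  else if d ≠ 0 then
    acc ++ [PySem.List.pyGetD thaiB d [] ++ PySem.List.pyGetD unitB i []]
  else acc

def number_to_thaitext_alt (number : Int) : String :=
  if number < 0 ∨ 10000000 ≤ number then "Invalid number"
  else if number = 0 then "ศูนย์"
  else
    let s := PySem.Int.toChars number
    let out := (PySem.List.enumerate s 0).foldl (stepB s) []
    String.ofList (PySem.Chars.join [] out)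

-- ===== PRECONDITION & SPEC =====
def Spec_number_to_thaitext (number : Int) (out : String) : Prop := out = number_to_thaitext_alt number
instance (number : Int) (out : String) : Decidable (Spec_number_to_thaitext number out) := by unfold Spec_number_to_thaitext; infer_instance

-- ===== CLAIM (what is proved, stated in full; the proofs are below) =====
def Claim_equal_number_to_thaitext : Prop := ∀ (number : Int), Dom_number_to_thaitext number → Spec_number_to_thaitext number (number_to_thaitext number)

-- ===== LEMMAS AND PROOFS =====

-- The common canonical value: the text fragment contributed by digit d at decimal exponent i,
-- where nz says whether the next more significant digit is nonzero.
def pieceC (i d : Nat) (nz : Bool) : List Char :=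
  if i = 1 ∧ d = 2 then "ยี่สิบ".toList
  else if i = 1 ∧ d = 1 then "สิบ".toList
  else if 1 < i ∧ d = 1 ∧ nz = true then "เอ็ด".toList ++ unitA.getD i []
  else if d ≠ 0 then thaiB.getD d [] ++ unitA.getD i []
  else []

-- canonical result over the least-significant-first digit list, starting at exponent i
def canonC : List Nat → Nat → List Char
  | [], _ => []
  | d :: rest, i => canonC rest (i + 1) ++ pieceC i d (decide (rest.headD 0 ≠ 0))

-- ---- A side ----

lemma loopA_acc (m : Nat) : ∀ (number i : Int), number.toNat = m →
    ∀ text, loopA number i text = loopA number i [] ++ text := by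
  induction m using Nat.strong_induction_on with
  | _ m ih =>
    intro number i hm text
    by_cases h : 0 < number
    · rw [loopA, dif_pos h]
      conv_rhs => rw [loopA, dif_pos h]
      have hdec : (PySem.Int.floordiv number 10).toNat < m := by
        rw [PySem.Int.floordiv_eq_ediv_of_pos (by norm_num)]; omega
      rw [ih _ hdec _ _ rfl]
      conv_rhs => rw [ih _ hdec _ _ rfl]
      split_ifs <;> simp
    · rw [loopA, dif_neg h]
      conv_rhs => rw [loopA, dif_neg h]
      simp

lemma thai_getD (k : Nat) (hk : k < 10) :
    PySem.Dict.getD thaiA (k : Int) [] = thaiB.getD k [] := by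
  interval_cases k <;> rfl

lemma loopA_eq_canonC (m : Nat) : ∀ i : Nat, loopA (m : Int) (i : Int) [] = canonC (Nat.digits 10 m) i := by
  induction m using Nat.strong_induction_on with
  | _ m ih =>
    intro i
    rw [loopA]
    by_cases hm : 0 < m
    · rw [dif_pos (by exact_mod_cast hm)]
      have hmod : PySem.Int.mod (m : Int) 10 = ((m % 10 : Nat) : Int) := by
        rw [PySem.Int.mod_eq_emod_of_pos (by norm_num)]; omega
      have hdiv : PySem.Int.floordiv (m : Int) 10 = ((m / 10 : Nat) : Int) := by
        rw [PySem.Int.floordiv_eq_ediv_of_pos (by norm_num)]; omega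
      have hdec : m / 10 < m := Nat.div_lt_self hm (by norm_num)
      have hmodd : PySem.Int.mod (((m / 10 : Nat)) : Int) 10 = ((m / 10 % 10 : Nat) : Int) := by
        rw [PySem.Int.mod_eq_emod_of_pos (by norm_num)]; omega
      have hhead : (Nat.digits 10 (m / 10)).headD 0 = m / 10 % 10 := by
        by_cases h0 : m / 10 = 0
        · simp [h0]
        · rw [Nat.digits_def' (by norm_num) (Nat.pos_of_ne_zero h0)]; rfl
      rw [Nat.digits_def' (by norm_num) hm]
      show loopA (PySem.Int.floordiv (m : Int) 10) ((i : Int) + 1) _ =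
        canonC (Nat.digits 10 (m / 10)) (i + 1) ++
          pieceC i (m % 10) (decide ((Nat.digits 10 (m / 10)).headD 0 ≠ 0))
      rw [loopA_acc (PySem.Int.floordiv (m : Int) 10).toNat _ _ rfl]
      have hcast : ((i : Int) + 1) = ((i + 1 : Nat) : Int) := by push_cast; ring
      rw [hdiv, hcast, ih _ hdec]
      congr 1
      -- the step's fragment equals pieceC
      have hm10 : m % 10 < 10 := Nat.mod_lt _ (by norm_num)
      rw [hmod, hmodd]
      unfold pieceC
      rw [hhead]
      simp only [decide_eq_true_eq]
      have e1 : ((i : Int) = 1 ∧ ((m % 10 : Nat) : Int) = 2) ↔ (i = 1 ∧ m % 10 = 2) := by omega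
      have e2 : ((i : Int) = 1 ∧ ((m % 10 : Nat) : Int) = 1) ↔ (i = 1 ∧ m % 10 = 1) := by omega
      have e3 : (1 < (i : Int) ∧ ((m % 10 : Nat) : Int) = 1 ∧ ((m / 10 % 10 : Nat) : Int) ≠ 0) ↔
          (1 < i ∧ m % 10 = 1 ∧ m / 10 % 10 ≠ 0) := by omega
      have e4 : (((m % 10 : Nat) : Int) ≠ 0) ↔ (m % 10 ≠ 0) := by omega
      simp only [e1, e2, e3, e4]
      split_ifs <;> simp
      rw [show ((m : Int) % 10) = ((m % 10 : Nat) : Int) from by omega, thai_getD _ hm10]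
      simp [List.getD_eq_getElem?_getD]
    · rw [dif_neg (by exact_mod_cast hm)]
      have : m = 0 := by omega
      simp [this, canonC]

-- ---- B side ----

-- the loop body as an appended fragment list
def fragB (s : List Char) (jc : Int × Char) : List (List Char) :=
  let j := jc.1
  let d : Int := (jc.2.toNat : Int) - 48
  let i : Int := (s.length : Int) - 1 - j
  if i = 1 ∧ d = 2 then ["ยี่สิบ".toList]
  else if i = 1 ∧ d = 1 then ["สิบ".toList]
  else if 1 < i ∧ d = 1 ∧ 0 < j ∧ PySem.List.pyGetD s (j - 1) ' ' ≠ '0' then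
    ["เอ็ด".toList ++ PySem.List.pyGetD unitB i []]
  else if d ≠ 0 then
    [PySem.List.pyGetD thaiB d [] ++ PySem.List.pyGetD unitB i []]
  else []

lemma stepB_eq_append (s : List Char) (acc : List (List Char)) (jc : Int × Char) :
    stepB s acc jc = acc ++ fragB s jc := by
  simp only [stepB, fragB]
  split_ifs <;> simp

lemma flatten_join : ∀ (l : List (List Char)), PySem.Chars.join [] l = l.flatten
  | [] => rfl
  | [_] => by simp [PySem.Chars.join, List.intercalate]
  | a :: b :: t => by
    have ih := flatten_join (b :: t)
    simp only [PySem.Chars.join, List.intercalate] at ih ⊢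
    rw [show List.intersperse ([] : List Char) (a :: b :: t) =
      a :: [] :: List.intersperse [] (b :: t) from rfl]
    simp [ih]

lemma digitChar_sub (d : Nat) (hd : d < 10) :
    ((Nat.digitChar d).toNat : Int) - 48 = (d : Int) := by interval_cases d <;> decide

lemma digitChar_ne_zero (r : Nat) (hr : r < 10) : (Nat.digitChar r ≠ '0') ↔ r ≠ 0 := by
  interval_cases r <;> decide

lemma fragB_piece (rest : List Nat) (ext : List Char) (d : Nat) (hd : d < 10)
    (hrest : ∀ x ∈ rest, x < 10) :
    (fragB ((rest.map Nat.digitChar).reverse ++ [Nat.digitChar d] ++ ext)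
      ((rest.length : Int), Nat.digitChar d)).flatten =
    pieceC ext.length d (decide (rest.headD 0 ≠ 0)) := by
  simp only [fragB, pieceC]
  have hlen : ((((rest.map Nat.digitChar).reverse ++ [Nat.digitChar d] ++ ext).length : Nat) : Int)
      - 1 - (rest.length : Int) = (ext.length : Int) := by simp; omega
  have hd' := digitChar_sub d hd
  rw [hlen, hd']
  have hlook : (0 < (rest.length : Int) ∧
      PySem.List.pyGetD ((rest.map Nat.digitChar).reverse ++ [Nat.digitChar d] ++ ext)
        ((rest.length : Int) - 1) ' ' ≠ '0') ↔ rest.headD 0 ≠ 0 := by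
    cases rest with
    | nil => simp
    | cons r0 rtl =>
      have hr0 : r0 < 10 := hrest r0 (by simp)
      have hidx : (((r0 :: rtl).length : Nat) : Int) - 1 = ((rtl.length : Nat) : Int) := by simp
      rw [hidx, PySem.List.pyGetD_natCast]
      have hget : (((r0 :: rtl).map Nat.digitChar).reverse ++ [Nat.digitChar d] ++ ext).getD
          rtl.length ' ' = Nat.digitChar r0 := by
        have h1 : rtl.length < ((r0 :: rtl).map Nat.digitChar).reverse.length := by simp
        rw [List.append_assoc, List.getD_eq_getElem?_getD, List.getElem?_append_left h1]
        simp
      rw [hget]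
      simp only [List.headD_cons]
      constructor
      · rintro ⟨-, h⟩; exact (digitChar_ne_zero r0 hr0).mp h
      · intro h; exact ⟨by omega, (digitChar_ne_zero r0 hr0).mpr h⟩
  simp only [decide_eq_true_eq]
  have e1 : (((ext.length : Nat) : Int) = 1 ∧ (d : Int) = 2) ↔ (ext.length = 1 ∧ d = 2) := by omega
  have e2 : (((ext.length : Nat) : Int) = 1 ∧ (d : Int) = 1) ↔ (ext.length = 1 ∧ d = 1) := by omega
  have e3 : (1 < ((ext.length : Nat) : Int) ∧ (d : Int) = 1 ∧ 0 < (rest.length : Int) ∧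
      PySem.List.pyGetD ((rest.map Nat.digitChar).reverse ++ [Nat.digitChar d] ++ ext)
        ((rest.length : Int) - 1) ' ' ≠ '0') ↔
      (1 < ext.length ∧ d = 1 ∧ rest.headD 0 ≠ 0) := by
    constructor
    · rintro ⟨h1, h2, h3, h4⟩
      exact ⟨by omega, by omega, hlook.mp ⟨h3, h4⟩⟩
    · rintro ⟨h1, h2, h3⟩
      obtain ⟨h4, h5⟩ := hlook.mpr h3
      exact ⟨by omega, by omega, h4, h5⟩
  have e4 : ((d : Int) ≠ 0) ↔ (d ≠ 0) := by omega
  simp only [e1, e2, e3, e4]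
  split_ifs <;> simp [show unitB = unitA from rfl]

lemma flatMap_fragB (ds : List Nat) : ∀ ext : List Char, (∀ x ∈ ds, x < 10) →
    ((PySem.List.enumerate ((ds.map Nat.digitChar).reverse) 0).flatMap
      (fragB ((ds.map Nat.digitChar).reverse ++ ext))).flatten = canonC ds ext.length := by
  induction ds with
  | nil => intro ext _; simp [PySem.List.enumerate_nil, canonC]
  | cons d rest ih =>
    intro ext hds
    have hrev : ((d :: rest).map Nat.digitChar).reverse =
        (rest.map Nat.digitChar).reverse ++ [Nat.digitChar d] := by simp
    rw [hrev, PySem.List.enumerate_append, List.flatMap_append, List.flatten_append]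
    have hs : (rest.map Nat.digitChar).reverse ++ [Nat.digitChar d] ++ ext =
        (rest.map Nat.digitChar).reverse ++ (Nat.digitChar d :: ext) := by simp
    have h1 : ((PySem.List.enumerate ((rest.map Nat.digitChar).reverse) 0).flatMap
        (fragB ((rest.map Nat.digitChar).reverse ++ [Nat.digitChar d] ++ ext))).flatten =
        canonC rest (ext.length + 1) := by
      rw [hs]
      have := ih (Nat.digitChar d :: ext) (fun x hx => hds x (by simp [hx]))
      simpa using this
    rw [h1]
    have h2 : PySem.List.enumerate [Nat.digitChar d]
        (0 + ((rest.map Nat.digitChar).reverse).length) = [((rest.length : Int), Nat.digitChar d)] := by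
      simp [PySem.List.enumerate_cons, PySem.List.enumerate_nil]
    rw [h2]
    simp only [List.flatMap_cons, List.flatMap_nil, List.append_nil]
    rw [fragB_piece rest ext d (hds d (by simp)) (fun x hx => hds x (by simp [hx]))]
    rfl

-- ---- decimal string = digit list ----

lemma tdc_append (b : Nat) : ∀ (f n : Nat) (l : List Char),
    Nat.toDigitsCore b f n l = Nat.toDigitsCore b f n [] ++ l := by
  intro f
  induction f with
  | zero => intro n l; rfl
  | succ f ih =>
    intro n l
    simp only [Nat.toDigitsCore]
    split
    · rfl
    · rw [ih (n / b) ((n % b).digitChar :: l), ih (n / b) [(n % b).digitChar]]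
      simp

lemma tdc_fuel (b : Nat) (hb : 2 ≤ b) (n : Nat) : ∀ (f : Nat) (l : List Char), n < f →
    Nat.toDigitsCore b f n l = Nat.toDigitsCore b (n + 1) n l := by
  induction n using Nat.strong_induction_on with
  | _ n ih =>
    intro f l hf
    cases f with
    | zero => omega
    | succ f =>
      simp only [Nat.toDigitsCore]
      split
      · rfl
      · rename_i h0
        have hn : 0 < n := by
          rcases Nat.eq_zero_or_pos n with h | h
          · exfalso; exact h0 (by simp [h])
          · exact h
        have hlt : n / b < n := Nat.div_lt_self hn (by omega)
        rw [ih (n / b) hlt f _ (by omega), ih (n / b) hlt n _ hlt]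

lemma toDigits_eq_digits (n : Nat) (hn : 0 < n) :
    Nat.toDigits 10 n = ((Nat.digits 10 n).map Nat.digitChar).reverse := by
  induction n using Nat.strong_induction_on with
  | _ n ih =>
    rw [Nat.toDigits]
    simp only [Nat.toDigitsCore]
    by_cases h0 : n / 10 = 0
    · rw [if_pos h0]
      rw [Nat.digits_def' (by norm_num) hn]
      have : Nat.digits 10 (n / 10) = [] := by simp [h0]
      simp [this]
    · rw [if_neg h0]
      have hpos : 0 < n / 10 := Nat.pos_of_ne_zero h0
      have hlt : n / 10 < n := Nat.div_lt_self hn (by norm_num)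
      rw [tdc_append 10 n (n / 10) [(n % 10).digitChar],
          tdc_fuel 10 (by norm_num) (n / 10) n [] hlt]
      have : Nat.toDigitsCore 10 (n / 10 + 1) (n / 10) [] = Nat.toDigits 10 (n / 10) := rfl
      rw [this, ih (n / 10) hlt hpos, Nat.digits_def' (by norm_num) hn]
      simp

-- ===== VERDICT (by name: the statement is the Claim_ definition above) =====
theorem number_to_thaitext_spec : Claim_equal_number_to_thaitext := by
  intro number _
  unfold Spec_number_to_thaitext number_to_thaitext number_to_thaitext_alt
  by_cases hinv : number < 0 ∨ 10000000 ≤ number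
  · rw [if_pos hinv, if_pos hinv]
  · rw [if_neg hinv, if_neg hinv]
    by_cases h0 : number = 0
    · rw [if_pos h0, if_pos h0]; decide
    · rw [if_neg h0, if_neg h0]
      have hpos : 0 < number := by omega
      obtain ⟨m, hm⟩ : ∃ m : Nat, number = (m : Int) := ⟨number.toNat, by omega⟩
      have hmpos : 0 < m := by omega
      subst hm
      have hchars : PySem.Int.toChars (m : Int) = ((Nat.digits 10 m).map Nat.digitChar).reverse := by
        unfold PySem.Int.toChars
        rw [if_neg (by omega)]
        have : ((m : Int)).toNat = m := by omega
        rw [this, toDigits_eq_digits m hmpos]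
      have hfold : ∀ (s : List Char) (l : List (Int × Char)),
          l.foldl (stepB s) [] = l.flatMap (fragB s) := by
        intro s l
        have : stepB s = fun acc x => acc ++ fragB s x := by
          funext acc x; exact stepB_eq_append s acc x
        rw [this, PySem.List.foldl_append_eq_flatMap]
        simp
      show String.ofList (loopA (m : Int) 0 []) =
        String.ofList (PySem.Chars.join []
          ((PySem.List.enumerate (PySem.Int.toChars (m : Int)) 0).foldl
            (stepB (PySem.Int.toChars (m : Int))) []))
      rw [hfold, flatten_join]
      congr 1
      have hA := loopA_eq_canonC m 0
      norm_cast at hA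
      have hB := flatMap_fragB (Nat.digits 10 m) []
        (fun x hx => Nat.digits_lt_base (by norm_num) hx)
      simp only [List.length_nil, List.append_nil] at hB
      rw [hA, hchars, hB]
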